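-- pv_equiv track=rewrite | github.com/YitzhakGS/Estructuras_de_Datos_Py | estructura de datos_OmegaUp/examen.py | encontrar_coincidencias
-- ===== SOURCE A (Python) =====
-- def encontrar_coincidencias(matriz_principal, matriz_buscar):
--     n, m = len(matriz_principal), len(matriz_principal[0])
--     p, q = len(matriz_buscar), len(matriz_buscar[0])
--     coincidencias = []
--
--     for i in range(n - p + 1):
--         for j in range(m - q + 1):
--             es_coincidencia = True
--             for x in range(p):
--                 for y in range(q):
--                     if matriz_principal[i + x][j + y] != matriz_buscar[x][y]:
--                         es_coincidencia = False
--                         break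
--                 if not es_coincidencia:
--                     break
--             if es_coincidencia:
--                 coincidencias.append((i, j))
--     return coincidencias
-- ===== SOURCE B (Python) =====
-- def encontrar_coincidencias(matriz_principal, matriz_buscar):
--     B1, B2, MOD = 1000003, 1000033, (1 << 61) - 1
--     n, m = len(matriz_principal), len(matriz_principal[0])
--     p, q = len(matriz_buscar), len(matriz_buscar[0])
--
--     def h(base, vals):
--         acc = 0
--         for v in vals:
--             acc = (acc * base + v) % MOD
--         return acc
--
--     # fingerprint of every width-q window of every row, and of the pattern
--     rowh = [[h(B1, fila[j:j + q]) for j in range(m - q + 1)] for fila in matriz_principal]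
--     ph = h(B2, [h(B1, fila) for fila in matriz_buscar])
--
--     coincidencias = []
--     for i in range(n - p + 1):
--         for j in range(m - q + 1):
--             if h(B2, [rowh[i + x][j] for x in range(p)]) == ph and all(
--                     matriz_principal[i + x][j:j + q] == matriz_buscar[x]
--                     for x in range(p)):
--                 coincidencias.append((i, j))
--     return coincidencias
-- ===== Notes on version B (the rewrite author's own statement) =====
-- stated objective: alternative
-- what changed: Replaces the quadruple element-by-element scan by a fingerprint filter: each width-q row window is fingerprinted once, each candidate block is compared to the pattern by an O(p) fingerprint check, and the full slice comparison runs only on fingerprint matches (fewer comparisons asymptotically, but constant overhead: not measured faster).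
-- outside the precondition, e.g. on encontrar_coincidencias([[], [0]], [[], [0]]): A returns [(0, 0)], B returns []; on encontrar_coincidencias([[1, 2], [3]], [[9]]): A raises IndexError, B returns []; on encontrar_coincidencias([[1], [2, 3]], [[9]]): A returns [], B returns []
import Mathlib
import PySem

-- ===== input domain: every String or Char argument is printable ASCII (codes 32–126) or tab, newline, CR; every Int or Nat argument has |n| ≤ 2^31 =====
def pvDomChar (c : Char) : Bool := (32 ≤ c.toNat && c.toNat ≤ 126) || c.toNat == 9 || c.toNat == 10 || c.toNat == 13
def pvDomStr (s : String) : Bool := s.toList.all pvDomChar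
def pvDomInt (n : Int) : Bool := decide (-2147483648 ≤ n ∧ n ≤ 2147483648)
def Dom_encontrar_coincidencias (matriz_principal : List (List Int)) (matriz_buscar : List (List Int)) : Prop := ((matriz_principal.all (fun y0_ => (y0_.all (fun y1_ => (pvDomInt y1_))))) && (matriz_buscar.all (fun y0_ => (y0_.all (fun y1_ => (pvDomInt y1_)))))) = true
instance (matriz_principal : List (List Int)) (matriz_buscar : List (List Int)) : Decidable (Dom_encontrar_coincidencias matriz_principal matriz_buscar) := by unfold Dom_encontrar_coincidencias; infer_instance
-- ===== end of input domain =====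

-- B replaces A's quadruple element-by-element scan with row-window fingerprints plus an O(p)
-- fingerprint check per candidate block, verifying by slice comparison only on fingerprint matches.

-- ===== PORT A =====
-- mat[i][j]; exact when both indices are in range — Pre_ excludes the raising inputs
def pvGet2 (mat : List (List Int)) (i j : Int) : Int :=
  PySem.List.pyGetD (PySem.List.pyGetD mat i []) j 0

-- the inner 'for y in range(q)' loop with its break
def pvA_innerY (mp mb : List (List Int)) (i j x : Int) : List Int → Bool
  | [] => true
  | y :: ys =>
    if pvGet2 mp (i + x) (j + y) ≠ pvGet2 mb x y then false
    else pvA_innerY mp mb i j x ys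

-- the 'for x in range(p)' loop with its break
def pvA_loopX (mp mb : List (List Int)) (i j q : Int) : List Int → Bool
  | [] => true
  | x :: xs =>
    if pvA_innerY mp mb i j x (PySem.List.pyRange 0 q 1) then pvA_loopX mp mb i j q xs
    else false

def encontrar_coincidencias (matriz_principal : List (List Int)) (matriz_buscar : List (List Int)) : List (Int × Int) :=
  let n : Int := matriz_principal.length
  let m : Int := (PySem.List.pyGetD matriz_principal 0 []).length  -- len(matriz_principal[0]); raises on []: excluded by Pre_
  let p : Int := matriz_buscar.length
  let q : Int := (PySem.List.pyGetD matriz_buscar 0 []).length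
  (PySem.List.pyRange 0 (n - p + 1) 1).foldl (fun acc i =>
    (PySem.List.pyRange 0 (m - q + 1) 1).foldl (fun acc j =>
      if pvA_loopX matriz_principal matriz_buscar i j q (PySem.List.pyRange 0 p 1)
      then acc ++ [(i, j)] else acc) acc) []

-- ===== PORT B =====
-- h(base, vals): polynomial fingerprint mod 2^61-1
def pvHash (base : Int) (vals : List Int) : Int :=
  vals.foldl (fun acc v => PySem.Int.mod (acc * base + v) 2305843009213693951) 0

def encontrar_coincidencias_alt (matriz_principal : List (List Int)) (matriz_buscar : List (List Int)) : List (Int × Int) :=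
  let n : Int := matriz_principal.length
  let m : Int := (PySem.List.pyGetD matriz_principal 0 []).length  -- len(matriz_principal[0]); raises on []: excluded by Pre_
  let p : Int := matriz_buscar.length
  let q : Int := (PySem.List.pyGetD matriz_buscar 0 []).length
  let rowh : List (List Int) := matriz_principal.map (fun fila =>
    (PySem.List.pyRange 0 (m - q + 1) 1).map (fun j =>
      pvHash 1000003 (PySem.List.slice fila (some j) (some (j + q)))))
  let ph : Int := pvHash 1000033 (matriz_buscar.map (fun fila => pvHash 1000003 fila))
  (PySem.List.pyRange 0 (n - p + 1) 1).foldl (fun acc i =>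
    (PySem.List.pyRange 0 (m - q + 1) 1).foldl (fun acc j =>
      if (pvHash 1000033 ((PySem.List.pyRange 0 p 1).map (fun x => pvGet2 rowh (i + x) j)) == ph)
          && (PySem.List.pyRange 0 p 1).all (fun x =>
               PySem.List.slice (PySem.List.pyGetD matriz_principal (i + x) []) (some j) (some (j + q))
                 == PySem.List.pyGetD matriz_buscar x [])
      then acc ++ [(i, j)] else acc) acc) []

-- ===== PRECONDITION & SPEC =====
-- Pre_ excludes empty and non-rectangular (ragged) inputs: A raises IndexError on empty
-- matrices and on most ragged shapes, and on the ragged shapes where it does return, which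
-- elements its row-0-based ranges touch is accidental.
def Pre_encontrar_coincidencias (matriz_principal : List (List Int)) (matriz_buscar : List (List Int)) : Prop :=
  matriz_principal ≠ [] ∧ matriz_buscar ≠ [] ∧
  (∀ r ∈ matriz_principal, r.length = (PySem.List.pyGetD matriz_principal 0 []).length) ∧
  (∀ r ∈ matriz_buscar, r.length = (PySem.List.pyGetD matriz_buscar 0 []).length)
instance (matriz_principal : List (List Int)) (matriz_buscar : List (List Int)) : Decidable (Pre_encontrar_coincidencias matriz_principal matriz_buscar) := by unfold Pre_encontrar_coincidencias; infer_instance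

def pvWitness_encontrar_coincidencias : List (List Int) × List (List Int) := ([[1, 2], [3, 4]], [[3, 4]])

def Spec_encontrar_coincidencias (matriz_principal : List (List Int)) (matriz_buscar : List (List Int)) (out : List (Int × Int)) : Prop := out = encontrar_coincidencias_alt matriz_principal matriz_buscar
instance (matriz_principal : List (List Int)) (matriz_buscar : List (List Int)) (out : List (Int × Int)) : Decidable (Spec_encontrar_coincidencias matriz_principal matriz_buscar out) := by unfold Spec_encontrar_coincidencias; infer_instance

-- ===== CLAIM (what is proved, stated in full; the proofs are below) =====
def Claim_equal_encontrar_coincidencias : Prop := ∀ (matriz_principal : List (List Int)) (matriz_buscar : List (List Int)), Dom_encontrar_coincidencias matriz_principal matriz_buscar → Pre_encontrar_coincidencias matriz_principal matriz_buscar → Spec_encontrar_coincidencias matriz_principal matriz_buscar (encontrar_coincidencias matriz_principal matriz_buscar)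

-- ===== LEMMAS AND PROOFS =====

theorem pv_innerY_eq_all (mp mb : List (List Int)) (i j x : Int) (l : List Int) :
    pvA_innerY mp mb i j x l = l.all (fun y => pvGet2 mp (i + x) (j + y) == pvGet2 mb x y) := by
  induction l with
  | nil => rfl
  | cons y ys ih =>
    by_cases h : pvGet2 mp (i + x) (j + y) = pvGet2 mb x y <;>
      simp [pvA_innerY, h, ih]

theorem pv_loopX_eq_all (mp mb : List (List Int)) (i j q : Int) (l : List Int) :
    pvA_loopX mp mb i j q l = l.all (fun x => pvA_innerY mp mb i j x (PySem.List.pyRange 0 q 1)) := by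
  induction l with
  | nil => rfl
  | cons x xs ih =>
    by_cases h : pvA_innerY mp mb i j x (PySem.List.pyRange 0 q 1) = true <;>
      simp [pvA_loopX, h, ih]

-- slice-vs-pointwise: one row of the block matches the pattern row iff every element matches
theorem pv_row_eq (r s : List Int) (q jn : Nat) (hs : s.length = q) (hjq : jn + q ≤ r.length) :
    ((PySem.List.slice r (some (jn : Int)) (some ((jn : Int) + (q : Int))) == s) = true) ↔
      (∀ y : Int, 0 ≤ y → y < (q : Int) →
        PySem.List.pyGetD r ((jn : Int) + y) 0 = PySem.List.pyGetD s y 0) := by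
  rw [PySem.List.slice_natCast_add, beq_iff_eq]
  constructor
  · intro he y hy0 hyq
    have hk : y.toNat < q := by omega
    rw [PySem.List.pyGetD_eq_getElem r 0 (by omega) (by omega),
      PySem.List.pyGetD_eq_getElem s 0 hy0 (by omega)]
    have := congrArg (fun l => l[y.toNat]?) he
    simp only [List.getElem?_take, hk, if_true, List.getElem?_drop] at this
    rw [List.getElem?_eq_getElem (by omega), List.getElem?_eq_getElem (by omega)] at this
    simpa [show ((jn : Int) + y).toNat = jn + y.toNat by omega] using this
  · intro hp
    apply List.ext_getElem
    · simp [hs]; omega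
    · intro k hk1 hk2
      have hkq : k < q := by omega
      have := hp (k : Int) (by omega) (by omega)
      rw [PySem.List.pyGetD_eq_getElem r 0 (by omega) (by omega),
        PySem.List.pyGetD_eq_getElem s 0 (by omega) (by omega)] at this
      simpa [List.getElem_take, List.getElem_drop,
        show ((jn : Int) + (k : Int)).toNat = jn + k by omega,
        show ((k : Int)).toNat = k by omega] using this

-- one x of A's loop matches iff B's slice comparison for that x holds
theorem pv_cell_eq (mp mb : List (List Int))
    (hmp : ∀ r ∈ mp, r.length = (PySem.List.pyGetD mp 0 []).length)
    (hmb : ∀ r ∈ mb, r.length = (PySem.List.pyGetD mb 0 []).length)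
    (i j x : Int) (hi0 : 0 ≤ i) (hx0 : 0 ≤ x) (hxp : x < (mb.length : Int))
    (hin : i + (mb.length : Int) ≤ (mp.length : Int)) (hj0 : 0 ≤ j)
    (hjm : j + ((PySem.List.pyGetD mb 0 []).length : Int) ≤ ((PySem.List.pyGetD mp 0 []).length : Int)) :
    (pvA_innerY mp mb i j x (PySem.List.pyRange 0 ((PySem.List.pyGetD mb 0 []).length : Int) 1) = true)
    ↔ ((PySem.List.slice (PySem.List.pyGetD mp (i + x) []) (some j)
          (some (j + ((PySem.List.pyGetD mb 0 []).length : Int)))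
        == PySem.List.pyGetD mb x []) = true) := by
  have hrmem : PySem.List.pyGetD mp (i + x) [] ∈ mp :=
    PySem.List.pyGetD_mem mp [] ⟨by omega, by omega⟩
  have hsmem : PySem.List.pyGetD mb x [] ∈ mb :=
    PySem.List.pyGetD_mem mb [] ⟨by omega, by omega⟩
  have hr := hmp _ hrmem
  have hsl := hmb _ hsmem
  obtain ⟨jn, rfl⟩ : ∃ jn : Nat, j = (jn : Int) := ⟨j.toNat, (Int.toNat_of_nonneg hj0).symm⟩
  rw [pv_row_eq _ _ _ jn hsl (by omega)]
  rw [pv_innerY_eq_all, List.all_eq_true]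
  constructor
  · intro h y hy0 hyq
    have := h y (PySem.List.mem_pyRange_one.mpr ⟨hy0, hyq⟩)
    simpa [pvGet2, beq_iff_eq] using this
  · intro h y hy
    obtain ⟨hy0, hyq⟩ := PySem.List.mem_pyRange_one.mp hy
    simpa [pvGet2, beq_iff_eq] using h y hy0 hyq

-- if every row slice matches, the row fingerprints seen by B are exactly the pattern's
theorem pv_hash_eq (mp mb : List (List Int)) (i j : Int) (hi0 : 0 ≤ i)
    (hin : i + (mb.length : Int) ≤ (mp.length : Int)) (hj0 : 0 ≤ j)
    (hjm : j + ((PySem.List.pyGetD mb 0 []).length : Int) ≤ ((PySem.List.pyGetD mp 0 []).length : Int))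
    (hall : ∀ x : Int, 0 ≤ x → x < (mb.length : Int) →
      (PySem.List.slice (PySem.List.pyGetD mp (i + x) []) (some j)
          (some (j + ((PySem.List.pyGetD mb 0 []).length : Int)))
        == PySem.List.pyGetD mb x []) = true) :
    (PySem.List.pyRange 0 (mb.length : Int) 1).map (fun x =>
      pvGet2 (mp.map (fun fila =>
        (PySem.List.pyRange 0 (((PySem.List.pyGetD mp 0 []).length : Int) - ((PySem.List.pyGetD mb 0 []).length : Int) + 1) 1).map (fun j' =>
          pvHash 1000003 (PySem.List.slice fila (some j') (some (j' + ((PySem.List.pyGetD mb 0 []).length : Int))))))) (i + x) j)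
    = mb.map (fun fila => pvHash 1000003 fila) := by
  have step : ∀ x ∈ PySem.List.pyRange 0 (mb.length : Int) 1,
      pvGet2 (mp.map (fun fila =>
        (PySem.List.pyRange 0 (((PySem.List.pyGetD mp 0 []).length : Int) - ((PySem.List.pyGetD mb 0 []).length : Int) + 1) 1).map (fun j' =>
          pvHash 1000003 (PySem.List.slice fila (some j') (some (j' + ((PySem.List.pyGetD mb 0 []).length : Int))))))) (i + x) j
      = pvHash 1000003 (PySem.List.pyGetD mb x []) := by
    intro x hx
    obtain ⟨hx0, hxp⟩ := PySem.List.mem_pyRange_one.mp hx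
    unfold pvGet2
    rw [PySem.List.pyGetD_eq_getElem _ [] (by omega) (by rw [List.length_map]; omega)]
    rw [List.getElem_map]
    rw [PySem.List.pyGetD_map_pyRange_of_nonneg _ _ j 0 hj0 (by omega)]
    have hrow : mp[(i + x).toNat] = PySem.List.pyGetD mp (i + x) [] :=
      (PySem.List.pyGetD_eq_getElem mp [] (by omega) (by omega)).symm
    rw [hrow, beq_iff_eq.mp (hall x hx0 hxp)]
  rw [List.map_congr_left step]
  have : (fun x => pvHash 1000003 (PySem.List.pyGetD mb x ([] : List Int)))
      = (pvHash 1000003) ∘ (fun y => PySem.List.pyGetD mb y ([] : List Int)) := rfl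
  rw [this, ← List.map_map, PySem.List.map_pyGetD_pyRange_zero']

-- ===== VERDICT (by name: the statement is the Claim_ definition above) =====
theorem encontrar_coincidencias_spec : Claim_equal_encontrar_coincidencias := by
  unfold Claim_equal_encontrar_coincidencias
  intro mp mb _ hpre
  obtain ⟨hne1, hne2, hmp, hmb⟩ := hpre
  unfold Spec_encontrar_coincidencias
  simp only [encontrar_coincidencias, encontrar_coincidencias_alt]
  apply PySem.List.foldl_congr_mem
  intro acc i hi
  apply PySem.List.foldl_congr_mem
  intro acc2 j hj
  obtain ⟨hi0, hin⟩ := PySem.List.mem_pyRange_one.mp hi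
  obtain ⟨hj0, hjm⟩ := PySem.List.mem_pyRange_one.mp hj
  have hin' : i + (mb.length : Int) ≤ (mp.length : Int) := by omega
  have hjm' : j + ((PySem.List.pyGetD mb 0 []).length : Int) ≤ ((PySem.List.pyGetD mp 0 []).length : Int) := by omega
  by_cases hAll : ((PySem.List.pyRange 0 (mb.length : Int) 1).all (fun x =>
      PySem.List.slice (PySem.List.pyGetD mp (i + x) []) (some j)
          (some (j + ((PySem.List.pyGetD mb 0 []).length : Int)))
        == PySem.List.pyGetD mb x [])) = true
  · have hallx : ∀ x : Int, 0 ≤ x → x < (mb.length : Int) →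
        (PySem.List.slice (PySem.List.pyGetD mp (i + x) []) (some j)
            (some (j + ((PySem.List.pyGetD mb 0 []).length : Int)))
          == PySem.List.pyGetD mb x []) = true := by
      intro x hx0 hxp
      exact List.all_eq_true.mp hAll x (PySem.List.mem_pyRange_one.mpr ⟨hx0, hxp⟩)
    have hA : pvA_loopX mp mb i j ((PySem.List.pyGetD mb 0 []).length : Int)
        (PySem.List.pyRange 0 (mb.length : Int) 1) = true := by
      rw [pv_loopX_eq_all, List.all_eq_true]
      intro x hx
      obtain ⟨hx0, hxp⟩ := PySem.List.mem_pyRange_one.mp hx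
      exact (pv_cell_eq mp mb hmp hmb i j x hi0 hx0 hxp hin' hj0 hjm').mpr (hallx x hx0 hxp)
    have hmapeq := pv_hash_eq mp mb i j hi0 hin' hj0 hjm' hallx
    rw [hA, hmapeq, hAll]
    simp
  · have hAllf := Bool.eq_false_iff.mpr hAll
    have hA : pvA_loopX mp mb i j ((PySem.List.pyGetD mb 0 []).length : Int)
        (PySem.List.pyRange 0 (mb.length : Int) 1) = false := by
      apply Bool.eq_false_iff.mpr
      intro hcon
      apply hAll
      rw [pv_loopX_eq_all, List.all_eq_true] at hcon
      rw [List.all_eq_true]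
      intro x hx
      obtain ⟨hx0, hxp⟩ := PySem.List.mem_pyRange_one.mp hx
      exact (pv_cell_eq mp mb hmp hmb i j x hi0 hx0 hxp hin' hj0 hjm').mp (hcon x hx)
    rw [hA, hAllf, Bool.and_false]
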